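-- pv_equiv track=rewrite | github.com/StrayCamel247/Leetcode | 486.预测赢家.py | dynamic_programing
-- ===== SOURCE A (Python) =====
-- from typing import List
--
-- def dynamic_programing(nums: List[int]) -> bool:
--     # 镜像对手问题，如果nums长度为偶数个，直接返回胜利
--     if len(nums)%2 == 0:
--         return True
--     n = len(nums)
--
--     dp = [[0] * n for _ in range(n)]
--     for i, num in enumerate(nums):
--         dp[i][i] = num
--     for i in range(n - 2, -1, -1):
--         for j in range(i + 1, n):
--             dp[i][j] = max(nums[i] - dp[i + 1][j], nums[j] - dp[i][j - 1])
--     return dp[0][n - 1] >= 0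
-- ===== SOURCE B (Python) =====
-- from typing import List
-- from functools import lru_cache
--
-- def dynamic_programing(nums: List[int]) -> bool:
--     # even length: first player can mirror and always wins
--     if len(nums) % 2 == 0:
--         return True
--
--     @lru_cache(maxsize=None)
--     def best(i: int, j: int) -> int:
--         # optimal score difference the player to move achieves on nums[i..j]
--         if j <= i:
--             return nums[i]
--         return max(nums[i] - best(i + 1, j), nums[j] - best(i, j - 1))
--
--     return best(0, len(nums) - 1) >= 0
-- ===== Notes on version B (the rewrite author's own statement) =====
-- stated objective: alternative
-- what changed: Replaces the bottom-up n-by-n DP table filled by nested index loops with a top-down memoized recursion best(i,j) over shrinking intervals (lru_cache), keeping the even-length shortcut and the >=0 comparison.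
import Mathlib
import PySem

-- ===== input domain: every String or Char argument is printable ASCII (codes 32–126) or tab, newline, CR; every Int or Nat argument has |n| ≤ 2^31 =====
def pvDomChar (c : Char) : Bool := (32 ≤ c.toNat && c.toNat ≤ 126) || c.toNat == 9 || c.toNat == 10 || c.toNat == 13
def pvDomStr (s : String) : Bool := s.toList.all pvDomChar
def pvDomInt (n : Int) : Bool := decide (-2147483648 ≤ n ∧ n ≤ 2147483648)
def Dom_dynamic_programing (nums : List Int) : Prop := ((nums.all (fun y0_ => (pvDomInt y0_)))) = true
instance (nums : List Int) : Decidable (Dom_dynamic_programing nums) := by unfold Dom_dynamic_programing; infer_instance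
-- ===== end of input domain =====

-- B replaces the bottom-up n×n DP table filled by nested index loops with a
-- top-down memoized recursion over shrinking intervals (alternative decomposition, same result).

-- ===== PORT A =====
-- Literal port of A: even-length shortcut, an n×n table of zeros, the diagonal
-- pass over enumerate(nums), then the two nested index loops filling dp[i][j].
-- All indices are in range in Python, so pyGetD/pySetD are exact here.
def dynamic_programing (nums : List Int) : Bool :=
  if nums.length % 2 == 0 then true
  else
    let n : Int := PySem.List.len nums
    let dp0 : List (List Int) := (PySem.List.pyRange 0 n 1).map (fun _ => List.replicate n.toNat 0)
    let dp1 : List (List Int) := (PySem.List.enumerate nums 0).foldl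
      (fun dp p =>
        PySem.List.pySetD dp p.1 (PySem.List.pySetD (PySem.List.pyGetD dp p.1 []) p.1 p.2)) dp0
    let dp2 : List (List Int) := (PySem.List.pyRange (n - 2) (-1) (-1)).foldl
      (fun dp i =>
        (PySem.List.pyRange (i + 1) n 1).foldl
          (fun dp j =>
            PySem.List.pySetD dp i (PySem.List.pySetD (PySem.List.pyGetD dp i []) j
              (max (PySem.List.pyGetD nums i 0 - PySem.List.pyGetD (PySem.List.pyGetD dp (i + 1) []) j 0)
                   (PySem.List.pyGetD nums j 0 - PySem.List.pyGetD (PySem.List.pyGetD dp i []) (j - 1) 0))))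
          dp) dp1
    decide (0 ≤ PySem.List.pyGetD (PySem.List.pyGetD dp2 0 []) (n - 1) 0)

-- ===== PORT B =====
-- best(i, j): the optimal score difference on nums[i..j]; the lru_cache memo
-- of Source B only caches values and never changes them, so the port is the bare recursion.
def pvBest (nums : List Int) (i j : Int) : Int :=
  if j ≤ i then PySem.List.pyGetD nums i 0
  else max (PySem.List.pyGetD nums i 0 - pvBest nums (i + 1) j)
           (PySem.List.pyGetD nums j 0 - pvBest nums i (j - 1))
termination_by (j - i).toNat
decreasing_by all_goals omega

def dynamic_programing_alt (nums : List Int) : Bool :=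
  if nums.length % 2 == 0 then true
  else decide (0 ≤ pvBest nums 0 (PySem.List.len nums - 1))

-- ===== PRECONDITION & SPEC =====
def Spec_dynamic_programing (nums : List Int) (out : Bool) : Prop := out = dynamic_programing_alt nums
instance (nums : List Int) (out : Bool) : Decidable (Spec_dynamic_programing nums out) := by unfold Spec_dynamic_programing; infer_instance

-- ===== CLAIM (what is proved, stated in full; the proofs are below) =====
def Claim_equal_dynamic_programing : Prop := ∀ (nums : List Int), Dom_dynamic_programing nums → Spec_dynamic_programing nums (dynamic_programing nums)

-- ===== LEMMAS AND PROOFS =====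

-- matrix read with Nat indices
def pvMget (dp : List (List Int)) (i j : Nat) : Int := (dp.getD i []).getD j 0

def pvShape (n : Nat) (dp : List (List Int)) : Prop :=
  dp.length = n ∧ ∀ r ∈ dp, r.length = n

-- the in-place update dp[i][j] = v
def pvMset (dp : List (List Int)) (i j : Nat) (v : Int) : List (List Int) :=
  dp.set i ((dp.getD i []).set j v)

lemma pv_getD_set {α : Type} (l : List α) (j j' : Nat) (v d : α) :
    (l.set j v).getD j' d = if j = j' ∧ j < l.length then v else l.getD j' d := by
  simp only [List.getD_eq_getElem?_getD, List.getElem?_set]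
  split_ifs with h1 h2 h3 h4 <;> simp_all <;> omega

lemma pv_row_len {n : Nat} {dp : List (List Int)} (h : pvShape n dp) {i : Nat} (hi : i < n) :
    (dp.getD i []).length = n := by
  have hlt : i < dp.length := h.1 ▸ hi
  rw [List.getD_eq_getElem _ _ hlt]
  exact h.2 _ (List.getElem_mem hlt)

lemma pvShape_mset {n : Nat} {dp : List (List Int)} (h : pvShape n dp) {i : Nat} (j : Nat)
    (hi : i < n) (v : Int) : pvShape n (pvMset dp i j v) := by
  refine ⟨by simp [pvMset, h.1], ?_⟩
  intro r hr
  rcases List.mem_or_eq_of_mem_set hr with hr | rfl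
  · exact h.2 _ hr
  · rw [List.length_set]; exact pv_row_len h hi

lemma pvMget_mset {n : Nat} {dp : List (List Int)} (h : pvShape n dp)
    (i j i' j' : Nat) (hi : i < n) (hj : j < n) (v : Int) :
    pvMget (pvMset dp i j v) i' j' = if i = i' ∧ j = j' then v else pvMget dp i' j' := by
  have hrow := pv_row_len h hi
  unfold pvMget pvMset
  rw [pv_getD_set]
  by_cases hii : i = i'
  · subst hii
    rw [if_pos ⟨rfl, h.1 ▸ hi⟩]
    rw [pv_getD_set]
    by_cases hjj : j = j'
    · rw [if_pos ⟨hjj, hrow ▸ hj⟩, if_pos ⟨rfl, hjj⟩]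
    · rw [if_neg (by tauto), if_neg (by tauto)]
  · rw [if_neg (by tauto), if_neg (by tauto)]

-- row invariant: rows below i correct, all diagonal entries correct,
-- and row i correct strictly left of column j (on the upper triangle)
def pvRInv (nums : List Int) (n i j : Nat) (dp : List (List Int)) : Prop :=
  pvShape n dp ∧ ∀ i' j' : Nat, i' ≤ j' → j' < n →
    (i < i' ∨ i' = j' ∨ (i' = i ∧ j' < j)) →
    pvMget dp i' j' = pvBest nums i' j'

-- pvBest at Nat-cast indices, base case and unfolding step
lemma pvBest_diag (nums : List Int) (i : Nat) :
    pvBest nums i i = nums.getD i 0 := by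
  rw [pvBest]
  simp

lemma pvBest_step (nums : List Int) (i j : Nat) (h : i < j) :
    pvBest nums i j =
      max (nums.getD i 0 - pvBest nums (↑(i + 1)) j)
          (nums.getD j 0 - pvBest nums i (↑(j - 1))) := by
  rw [pvBest, if_neg (by exact_mod_cast Nat.not_le.mpr h)]
  have h1 : (i : Int) + 1 = ((i + 1 : Nat) : Int) := by push_cast; ring
  have h2 : (j : Int) - 1 = ((j - 1 : Nat) : Int) := by omega
  rw [h1, h2, PySem.List.pyGetD_natCast, PySem.List.pyGetD_natCast]

-- the diagonal pass: after folding over enumerate, every diagonal entry holds nums[i]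
lemma pv_diag_fold (nums : List Int) (n : Nat) (hn : n = nums.length) :
    ∀ (xs : List Int) (s : Nat), s + xs.length = n → nums.drop s = xs →
    ∀ dp : List (List Int), pvShape n dp →
    (∀ i, i < s → pvMget dp i i = nums.getD i 0) →
    pvShape n ((PySem.List.enumerate xs (s : Int)).foldl
        (fun dp p => PySem.List.pySetD dp p.1
          (PySem.List.pySetD (PySem.List.pyGetD dp p.1 []) p.1 p.2)) dp) ∧
    ∀ i, i < n → pvMget ((PySem.List.enumerate xs (s : Int)).foldl
        (fun dp p => PySem.List.pySetD dp p.1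
          (PySem.List.pySetD (PySem.List.pyGetD dp p.1 []) p.1 p.2)) dp) i i = nums.getD i 0 := by
  intro xs
  induction xs with
  | nil =>
    intro s hs hdrop dp hsh hdiag
    have hs' : s = n := by simpa using hs
    simp only [PySem.List.enumerate_nil, List.foldl_nil]
    exact ⟨hsh, fun i hi => hdiag i (by omega)⟩
  | cons x xs ih =>
    intro s hs hdrop dp hsh hdiag
    have hsn : s < n := by simp at hs; omega
    have hstep : (PySem.List.pySetD dp (s : Int)
        (PySem.List.pySetD (PySem.List.pyGetD dp (s : Int) []) (s : Int) x)) = pvMset dp s s x := by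
      simp [pvMset]
    have hx : nums.getD s 0 = x := by
      have h : (List.drop s nums)[0]? = nums[s + 0]? := List.getElem?_drop
      rw [hdrop] at h
      simp only [List.getElem?_cons_zero, Nat.add_zero] at h
      simp [List.getD_eq_getElem?_getD, ← h]
    have hsh' := pvShape_mset hsh s hsn x
    rw [PySem.List.enumerate_cons, List.foldl_cons]
    simp only at hstep ⊢
    rw [hstep]
    have hdrop' : nums.drop (s + 1) = xs := by
      have := congrArg List.tail hdrop
      simpa [List.drop_drop] using this
    have hpush : ((s : Int) + 1) = ((s + 1 : Nat) : Int) := by push_cast; ring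
    rw [hpush]
    refine ih (s + 1) (by simp at hs ⊢; omega) hdrop' _ hsh' ?_
    intro i hi
    rw [pvMget_mset hsh s s i i hsn hsn x]
    by_cases hsi : s = i
    · subst hsi; rw [if_pos ⟨rfl, rfl⟩]; exact hx.symm
    · rw [if_neg (by tauto)]
      exact hdiag i (by omega)

-- the inner loop: filling row i from column j to the right
lemma pv_inner_fold (nums : List Int) (n : Nat) (hn : n = nums.length) (i : Nat) (hi : i < n) :
    ∀ (k jN : Nat) (dp : List (List Int)), n ≤ jN + k → i < jN → pvRInv nums n i jN dp →
    pvRInv nums n i n ((PySem.List.pyRange (jN : Int) (n : Int) 1).foldl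
      (fun dp j =>
        PySem.List.pySetD dp (i : Int) (PySem.List.pySetD (PySem.List.pyGetD dp (i : Int) []) j
          (max (PySem.List.pyGetD nums (i : Int) 0 -
                  PySem.List.pyGetD (PySem.List.pyGetD dp ((i : Int) + 1) []) j 0)
               (PySem.List.pyGetD nums j 0 -
                  PySem.List.pyGetD (PySem.List.pyGetD dp (i : Int) []) (j - 1) 0)))) dp) := by
  intro k
  induction k with
  | zero =>
    intro jN dp hk hij hinv
    rw [PySem.List.pyRange_one_eq_nil (by exact_mod_cast by omega : (n : Int) ≤ (jN : Int))]
    exact ⟨hinv.1, fun i' j' h1 h2 h3 => hinv.2 i' j' h1 h2 (by omega)⟩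
  | succ k ih =>
    intro jN dp hk hij hinv
    by_cases hjn : n ≤ jN
    · rw [PySem.List.pyRange_one_eq_nil (by exact_mod_cast hjn)]
      exact ⟨hinv.1, fun i' j' h1 h2 h3 => hinv.2 i' j' h1 h2 (by omega)⟩
    · push_neg at hjn
      rw [PySem.List.pyRange_one_cons (by exact_mod_cast hjn), List.foldl_cons]
      -- the value written at (i, jN) is pvBest nums i jN
      have hr1 : PySem.List.pyGetD (PySem.List.pyGetD dp ((i : Int) + 1) []) (jN : Int) 0
          = pvBest nums (↑(i + 1)) (jN : Int) := by
        have hpush : ((i : Int) + 1) = ((i + 1 : Nat) : Int) := by push_cast; ring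
        rw [hpush, PySem.List.pyGetD_natCast, PySem.List.pyGetD_natCast]
        exact hinv.2 (i + 1) jN (by omega) hjn (by omega)
      have hr2 : PySem.List.pyGetD (PySem.List.pyGetD dp (i : Int) []) ((jN : Int) - 1) 0
          = pvBest nums (i : Int) (↑(jN - 1)) := by
        have hpush : ((jN : Int) - 1) = ((jN - 1 : Nat) : Int) := by omega
        rw [hpush, PySem.List.pyGetD_natCast, PySem.List.pyGetD_natCast]
        by_cases hd : jN - 1 = i
        · rw [hd]; exact hinv.2 i i (by omega) (by omega) (by omega)
        · exact hinv.2 i (jN - 1) (by omega) (by omega) (by omega)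
      have hv : max (PySem.List.pyGetD nums (i : Int) 0 -
                  PySem.List.pyGetD (PySem.List.pyGetD dp ((i : Int) + 1) []) (jN : Int) 0)
               (PySem.List.pyGetD nums (jN : Int) 0 -
                  PySem.List.pyGetD (PySem.List.pyGetD dp (i : Int) []) ((jN : Int) - 1) 0)
          = pvBest nums (i : Int) (jN : Int) := by
        rw [hr1, hr2, pvBest_step nums i jN hij, PySem.List.pyGetD_natCast, PySem.List.pyGetD_natCast]
      have hstep : (PySem.List.pySetD dp (i : Int)
          (PySem.List.pySetD (PySem.List.pyGetD dp (i : Int) []) (jN : Int)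
            (max (PySem.List.pyGetD nums (i : Int) 0 -
                  PySem.List.pyGetD (PySem.List.pyGetD dp ((i : Int) + 1) []) (jN : Int) 0)
               (PySem.List.pyGetD nums (jN : Int) 0 -
                  PySem.List.pyGetD (PySem.List.pyGetD dp (i : Int) []) ((jN : Int) - 1) 0))))
          = pvMset dp i jN (pvBest nums (i : Int) (jN : Int)) := by
        rw [hv]; simp [pvMset]
      rw [hstep]
      have hpush : ((jN : Int) + 1) = ((jN + 1 : Nat) : Int) := by push_cast; ring
      rw [hpush]
      refine ih (jN + 1) _ (by omega) (by omega) ?_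
      refine ⟨pvShape_mset hinv.1 jN hi _, ?_⟩
      intro i' j' h1 h2 h3
      rw [pvMget_mset hinv.1 i jN i' j' hi hjn _]
      by_cases heq : i = i' ∧ jN = j'
      · rw [if_pos heq, heq.1, heq.2]
      · rw [if_neg heq]
        exact hinv.2 i' j' h1 h2 (by omega)

-- the row invariant between outer iterations
def pvInv (nums : List Int) (n k : Nat) (dp : List (List Int)) : Prop :=
  pvShape n dp ∧ ∀ i' j' : Nat, i' ≤ j' → j' < n → (k ≤ i' ∨ i' = j') →
    pvMget dp i' j' = pvBest nums i' j'

-- the outer countdown loop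
lemma pv_outer_fold (nums : List Int) (n : Nat) (hn : n = nums.length) :
    ∀ (k : Nat) (a : Int) (dp : List (List Int)), (a + 1).toNat ≤ k → a < (n : Int) →
    pvInv nums n (a + 1).toNat dp →
    pvInv nums n 0 ((PySem.List.pyRange a (-1) (-1)).foldl
      (fun dp i =>
        (PySem.List.pyRange (i + 1) (n : Int) 1).foldl
          (fun dp j =>
            PySem.List.pySetD dp i (PySem.List.pySetD (PySem.List.pyGetD dp i []) j
              (max (PySem.List.pyGetD nums i 0 -
                      PySem.List.pyGetD (PySem.List.pyGetD dp (i + 1) []) j 0)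
                   (PySem.List.pyGetD nums j 0 -
                      PySem.List.pyGetD (PySem.List.pyGetD dp i []) (j - 1) 0)))) dp) dp) := by
  intro k
  induction k with
  | zero =>
    intro a dp hk ha hinv
    rw [PySem.List.pyRange_neg_one_eq_nil (by omega)]
    have : (a + 1).toNat = 0 := by omega
    rw [this] at hinv
    exact hinv
  | succ k ih =>
    intro a dp hk ha hinv
    by_cases hneg : a ≤ -1
    · rw [PySem.List.pyRange_neg_one_eq_nil hneg]
      have : (a + 1).toNat = 0 := by omega
      rw [this] at hinv
      exact hinv
    · push_neg at hneg
      have h0a : 0 ≤ a := by omega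
      obtain ⟨aN, rfl⟩ : ∃ m : Nat, a = (m : Int) := ⟨a.toNat, (Int.toNat_of_nonneg h0a).symm⟩
      have haN : aN < n := by exact_mod_cast ha
      rw [PySem.List.pyRange_neg_one_cons (by omega), List.foldl_cons]
      -- one inner pass turns pvInv (aN+1) into pvInv aN
      have hR : pvRInv nums n aN (aN + 1) dp := by
        refine ⟨hinv.1, ?_⟩
        intro i' j' h1 h2 h3
        refine hinv.2 i' j' h1 h2 ?_
        omega
      have hpush : ((aN : Int) + 1) = ((aN + 1 : Nat) : Int) := by push_cast; ring
      have hRn := pv_inner_fold nums n hn aN haN n (aN + 1) dp (by omega) (by omega) hR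
      rw [hpush] at hRn ⊢
      have hpush2 : ((aN : Int) - 1 + 1).toNat = aN := by omega
      refine ih ((aN : Int) - 1) _ (by omega) (by omega) ?_
      rw [hpush2]
      exact ⟨hRn.1, fun i' j' h1 h2 h3 => hRn.2 i' j' h1 h2 (by omega)⟩

theorem dynamic_programing_spec : Claim_equal_dynamic_programing := by
  unfold Claim_equal_dynamic_programing Spec_dynamic_programing
  intro nums _
  unfold dynamic_programing dynamic_programing_alt
  by_cases hev : nums.length % 2 == 0
  · rw [if_pos hev, if_pos hev]
  · rw [if_neg hev, if_neg hev]
    simp only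
    set n := nums.length with hn
    have hodd : n % 2 = 1 := by
      simp at hev; omega
    have hn1 : 1 ≤ n := by omega
    -- initial table: shape n, all zeros
    have hsh0 : pvShape n ((PySem.List.pyRange 0 (PySem.List.len nums) 1).map
        (fun _ => List.replicate (PySem.List.len nums).toNat 0)) := by
      constructor
      · simp [PySem.List.length_pyRange_one, PySem.List.len]
        omega
      · intro r hr
        simp only [List.mem_map] at hr
        obtain ⟨_, _, rfl⟩ := hr
        simp [PySem.List.len]
        omega
    have hlen : PySem.List.len nums = (n : Int) := by simp [PySem.List.len, hn]
    rw [hlen] at hsh0 ⊢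
    -- diagonal pass
    have hdiag := pv_diag_fold nums n rfl nums 0 (by omega) (by simp) _ hsh0 (by omega)
    rw [Int.natCast_zero] at hdiag
    -- outer loop
    have hInv1 : pvInv nums n ((n : Int) - 2 + 1).toNat (((PySem.List.enumerate nums 0).foldl
        (fun dp p => PySem.List.pySetD dp p.1
          (PySem.List.pySetD (PySem.List.pyGetD dp p.1 []) p.1 p.2))
        ((PySem.List.pyRange 0 (n : Int) 1).map (fun _ => List.replicate ((n : Int)).toNat 0)))) := by
      refine ⟨hdiag.1, ?_⟩
      intro i' j' h1 h2 h3
      have hij : i' = j' := by omega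
      subst hij
      rw [hdiag.2 i' h2, pvBest_diag]
    have hout := pv_outer_fold nums n rfl n ((n : Int) - 2) _ (by omega) (by omega) hInv1
    -- final read
    have hfin := hout.2 0 (n - 1) (by omega) (by omega) (by omega)
    have hcast : ((n : Int) - 1) = ((n - 1 : Nat) : Int) := by omega
    rw [hcast, PySem.List.pyGetD_natCast, PySem.List.pyGetD_zero]
    unfold pvMget at hfin
    rw [Nat.cast_zero] at hfin
    rw [hfin]
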